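-- pv_equiv track=rewrite | github.com/infinityq-tech/titanq-examples | Job Shop Scheduling Problem (JSSP)/utils.py | legal_starting_time
-- ===== SOURCE A (Python) =====
-- def legal_starting_time(jobs:dict):
--     """ Generates a dictionary that indicates at which time each task can start
--
--     Args:
--         jobs (dict): Dictionary where the key is the job number
--         and the value is a list of execution times of the tasks of the corresponding job key
--
--     Returns:
--         dict: The dictionary where the key is the id of the task
--             and the value is the time from which this task can start
--     """
--
--     d = {j : {} for j in jobs.keys()}
--
--     for job,l in d.items():
--         s = 0
--         for i in range(len(jobs[job])):
--             l[i] = s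
--             s += jobs[job][i][1]
--     count = 0
--     r = {}
--     for job,tasks in d.items():
--         for _, time in tasks.items():
--             r[count] = time
--             count+=1
--     return r
-- ===== SOURCE B (Python) =====
-- def legal_starting_time(jobs: dict):
--     starts = []
--     for durations in jobs.values():
--         total = sum(task[1] for task in durations)
--         suffix = 0
--         block = []
--         for task in reversed(durations):
--             suffix += task[1]
--             block.append(total - suffix)
--         starts.extend(reversed(block))
--     return {i: s for i, s in enumerate(starts)}
-- ===== Notes on version B (the rewrite author's own statement) =====
-- stated objective: alternative
-- what changed: B replaces A's forward prefix-sum into nested per-job dicts plus a second renumbering pass by a reverse traversal: for each job it first sums all durations, then walks the tasks back-to-front maintaining a suffix sum and emits each start as total minus suffix, reversing the block into one flat list numbered by a dict comprehension.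
import Mathlib
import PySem

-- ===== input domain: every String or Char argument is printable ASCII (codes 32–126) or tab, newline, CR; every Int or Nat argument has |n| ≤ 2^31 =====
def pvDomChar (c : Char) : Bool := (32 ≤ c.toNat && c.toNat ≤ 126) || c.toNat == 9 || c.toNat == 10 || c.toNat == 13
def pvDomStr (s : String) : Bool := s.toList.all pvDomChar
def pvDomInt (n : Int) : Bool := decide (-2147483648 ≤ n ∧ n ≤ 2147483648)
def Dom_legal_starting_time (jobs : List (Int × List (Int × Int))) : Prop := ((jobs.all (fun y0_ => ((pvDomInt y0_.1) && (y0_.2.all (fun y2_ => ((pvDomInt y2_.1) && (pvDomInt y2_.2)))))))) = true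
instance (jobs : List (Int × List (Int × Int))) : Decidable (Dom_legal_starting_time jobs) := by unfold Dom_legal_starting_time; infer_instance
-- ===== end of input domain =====

-- B computes each start by a reverse traversal (total of the job's durations minus a running
-- suffix sum) instead of A's forward prefix sums into nested dicts plus a renumbering pass.
-- Objective: alternative (same cost, different algorithm).

-- ===== PORT A =====
def legal_starting_time (jobs : List (Int × List (Int × Int))) : List (Int × Int) :=
  let jobsD : PySem.Dict Int (List (Int × Int)) := PySem.Dict.ofList jobs
  -- d = {j : {} for j in jobs.keys()}
  let d : PySem.Dict Int (PySem.Dict Int Int) :=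
    jobsD.keys.foldl (fun acc j => acc.insert j PySem.Dict.empty) PySem.Dict.empty
  -- for job,l in d.items(): s = 0; for i in range(len(jobs[job])): l[i] = s; s += jobs[job][i][1]
  -- (the Python mutates each inner dict l in place; here each value is rebuilt by the same loop)
  -- jobs[job]: job always comes from jobs.keys(), so the KeyError branch is unreachable
  let d2 : PySem.Dict Int (PySem.Dict Int Int) := PySem.Dict.mk <| d.items.map (fun p =>
    let tasks := jobsD.getD p.1 []
    (p.1, ((PySem.List.pyRange 0 (tasks.length : Int) 1).foldl
        (fun (st : PySem.Dict Int Int × Int) i =>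
          (st.1.insert i st.2, st.2 + (PySem.List.pyGetD tasks i (0, 0)).2))
        (p.2, 0)).1))
  -- count = 0; r = {}; for job,tasks in d.items(): for _,time in tasks.items(): r[count] = time; count += 1
  (d2.items.foldl
    (fun (st : Int × PySem.Dict Int Int) p =>
      p.2.items.foldl (fun (st2 : Int × PySem.Dict Int Int) q =>
        (st2.1 + 1, st2.2.insert st2.1 q.2)) st)
    (0, PySem.Dict.empty)).2.items

-- ===== PORT B =====
-- one job's block: total = sum of durations, then reversed traversal with a suffix sum,
-- appending total - suffix, and the block is reversed back
def pvBlock (durations : List (Int × Int)) : List Int :=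
  let total := (durations.map (fun task => task.2)).sum
  ((durations.reverse.foldl
      (fun (st : Int × List Int) task => (st.1 + task.2, st.2 ++ [total - (st.1 + task.2)]))
      ((0 : Int), ([] : List Int))).2).reverse

def legal_starting_time_alt (jobs : List (Int × List (Int × Int))) : List (Int × Int) :=
  -- starts = []; for durations in jobs.values(): … starts.extend(reversed(block))
  let starts := jobs.foldl (fun (acc : List Int) p => acc ++ pvBlock p.2) []
  -- {i: s for i, s in enumerate(starts)}
  (PySem.Dict.ofList (PySem.List.enumerate starts 0)).items

-- ===== PRECONDITION & SPEC =====
-- Pre_ states the Python dict-argument invariant: jobs is a dict, so its keys are distinct.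
-- (The association list merely models that dict; A never raises inside it.)
def Pre_legal_starting_time (jobs : List (Int × List (Int × Int))) : Prop :=
  (jobs.map Prod.fst).Nodup
instance (jobs : List (Int × List (Int × Int))) : Decidable (Pre_legal_starting_time jobs) := by
  unfold Pre_legal_starting_time; infer_instance

def pvWitness_legal_starting_time : (List (Int × List (Int × Int))) :=
  [(0, [(7, 2), (8, 3)]), (1, [(9, 5)])]

def Spec_legal_starting_time (jobs : List (Int × List (Int × Int))) (out : List (Int × Int)) : Prop := out = legal_starting_time_alt jobs
instance (jobs : List (Int × List (Int × Int))) (out : List (Int × Int)) : Decidable (Spec_legal_starting_time jobs out) := by unfold Spec_legal_starting_time; infer_instance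

-- ===== CLAIM (what is proved, stated in full; the proofs are below) =====
def Claim_equal_legal_starting_time : Prop := ∀ (jobs : List (Int × List (Int × Int))), Dom_legal_starting_time jobs → Pre_legal_starting_time jobs → Spec_legal_starting_time jobs (legal_starting_time jobs)

-- ===== LEMMAS AND PROOFS =====

-- proof-side characterisation: the forward prefix-sum list (A's per-job values)
def pvStarts (durations : List (Int × Int)) : List Int :=
  (durations.foldl (fun (st : Int × List Int) task => (st.1 + task.2, st.2 ++ [st.1]))
    ((0 : Int), ([] : List Int))).2

-- the prefix-sum loop with a non-empty accumulator
theorem pvStarts_acc (tasks : List (Int × Int)) (s : Int) (acc : List Int) :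
    (tasks.foldl (fun (st : Int × List Int) task => (st.1 + task.2, st.2 ++ [st.1])) (s, acc)).2
      = acc ++ (tasks.foldl (fun (st : Int × List Int) task => (st.1 + task.2, st.2 ++ [st.1])) (s, [])).2 := by
  induction tasks generalizing s acc with
  | nil => simp
  | cons t rest ih =>
      simp only [List.foldl_cons]
      rw [ih (s + t.2) (acc ++ [s]), ih (s + t.2) ([] ++ [s])]
      simp

-- the prefix-sum loop started at s is the loop started at 0, shifted by s
theorem pvStarts_shift (tasks : List (Int × Int)) (s : Int) :
    (tasks.foldl (fun (st : Int × List Int) task => (st.1 + task.2, st.2 ++ [st.1])) (s, [])).2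
      = (tasks.foldl (fun (st : Int × List Int) task => (st.1 + task.2, st.2 ++ [st.1])) (0, [])).2.map
          (fun x => x + s) := by
  induction tasks generalizing s with
  | nil => simp
  | cons t rest ih =>
      simp only [List.foldl_cons]
      rw [pvStarts_acc rest (s + t.2) ([] ++ [s]), pvStarts_acc rest (0 + t.2) ([] ++ [0]),
        ih (s + t.2), ih (0 + t.2)]
      simp only [List.nil_append, List.singleton_append, List.map_map, List.map_cons,
        Function.comp_def, List.cons.injEq, zero_add]
      exact ⟨trivial, List.map_congr_left (fun a _ => by ring)⟩

-- the prefix list unfolds to 0 followed by the shifted prefix list of the tail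
theorem pvStarts_cons (t : Int × Int) (rest : List (Int × Int)) :
    pvStarts (t :: rest) = 0 :: (pvStarts rest).map (fun x => x + t.2) := by
  unfold pvStarts
  simp only [List.foldl_cons]
  rw [pvStarts_acc rest (0 + t.2) ([] ++ [0]), pvStarts_shift rest (0 + t.2)]
  simp

-- B's suffix loop with a non-empty accumulator
theorem pvBlock_acc (l : List (Int × Int)) (c s : Int) (acc : List Int) :
    (l.foldl (fun (st : Int × List Int) task => (st.1 + task.2, st.2 ++ [c - (st.1 + task.2)])) (s, acc)).2
      = acc ++ (l.foldl (fun (st : Int × List Int) task => (st.1 + task.2, st.2 ++ [c - (st.1 + task.2)])) (s, [])).2 := by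
  induction l generalizing s acc with
  | nil => simp
  | cons t rest ih =>
      simp only [List.foldl_cons]
      rw [ih (s + t.2) (acc ++ [c - (s + t.2)]), ih (s + t.2) ([] ++ [c - (s + t.2)])]
      simp

-- B's suffix loop accumulates the sum of the durations in its first component
theorem pvBlock_fst (l : List (Int × Int)) (c s : Int) (acc : List Int) :
    (l.foldl (fun (st : Int × List Int) task => (st.1 + task.2, st.2 ++ [c - (st.1 + task.2)])) (s, acc)).1
      = s + (l.map (fun task => task.2)).sum := by
  induction l generalizing s acc with
  | nil => simp
  | cons t rest ih =>
      simp only [List.foldl_cons]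
      rw [ih (s + t.2)]
      simp only [List.map_cons, List.sum_cons]
      ring

-- shifting the constant c shifts every emitted value
theorem pvBlock_shift (l : List (Int × Int)) (c k s : Int) :
    (l.foldl (fun (st : Int × List Int) task => (st.1 + task.2, st.2 ++ [(c + k) - (st.1 + task.2)])) (s, [])).2
      = (l.foldl (fun (st : Int × List Int) task => (st.1 + task.2, st.2 ++ [c - (st.1 + task.2)])) (s, [])).2.map
          (fun x => x + k) := by
  induction l generalizing s with
  | nil => simp
  | cons t rest ih =>
      simp only [List.foldl_cons]
      rw [pvBlock_acc rest (c + k) (s + t.2) ([] ++ [(c + k) - (s + t.2)]),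
        pvBlock_acc rest c (s + t.2) ([] ++ [c - (s + t.2)]), ih (s + t.2)]
      simp
      ring

-- B's reverse suffix-sum block equals A's forward prefix-sum list
theorem pvBlock_eq (d : List (Int × Int)) : pvBlock d = pvStarts d := by
  induction d with
  | nil => rfl
  | cons t rest ih =>
      rw [pvStarts_cons, ← ih]
      unfold pvBlock
      simp only [List.map_cons, List.sum_cons, List.reverse_cons, List.foldl_append,
        List.foldl_cons, List.foldl_nil]
      rw [pvBlock_fst rest.reverse (t.2 + (rest.map (fun task => task.2)).sum) 0 []]
      rw [show (rest.reverse.map (fun task => task.2)).sum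
            = (rest.map (fun task => task.2)).sum from by
          rw [List.map_reverse, List.sum_reverse]]
      rw [show t.2 + (rest.map (fun task => task.2)).sum
            - (0 + (rest.map (fun task => task.2)).sum + t.2) = 0 from by ring]
      rw [show t.2 + (rest.map (fun task => task.2)).sum
            = (rest.map (fun task => task.2)).sum + t.2 from add_comm _ _]
      rw [pvBlock_shift rest.reverse ((rest.map (fun task => task.2)).sum) t.2 0]
      simp [List.map_reverse]

theorem ofList_items_of_nodup {ν : Type} (l : List (Int × ν)) (h : (l.map Prod.fst).Nodup) :
    (PySem.Dict.ofList l).items = l := by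
  have := PySem.Dict.items_foldl_insert_fresh (l := l) (k := Prod.fst) (v := Prod.snd)
      (d := (PySem.Dict.empty : PySem.Dict Int ν)) (by simp) h
  simpa [PySem.Dict.ofList] using this

-- B's result is just the numbered flat list of prefix-sum blocks
theorem alt_eq (jobs : List (Int × List (Int × Int))) :
    legal_starting_time_alt jobs
      = PySem.List.enumerate ((jobs.map (fun p => pvStarts p.2)).flatten) 0 := by
  unfold legal_starting_time_alt
  have hstarts : jobs.foldl (fun (acc : List Int) p => acc ++ pvBlock p.2) []
      = (jobs.map (fun p => pvStarts p.2)).flatten := by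
    rw [PySem.List.foldl_append_eq_flatMap]
    simp only [List.nil_append, List.flatMap_def]
    congr 1
    exact List.map_congr_left (fun p _ => pvBlock_eq p.2)
  rw [hstarts]
  apply ofList_items_of_nodup
  have hp := PySem.List.pairwise_lt_enumerate
    (xs := (jobs.map (fun p => pvStarts p.2)).flatten) (s := 0)
  rw [List.nodup_iff_pairwise_ne, List.pairwise_map]
  exact hp.imp (fun h => ne_of_lt h)

-- A's inner loop (fill l with the prefix sums), run over enumerate, appends fresh keys
theorem inner_items (tasks : List (Int × Int)) (k s : Int) (r : PySem.Dict Int Int)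
    (h : ∀ x ∈ r.keys, x < k) :
    ((PySem.List.enumerate tasks k).foldl
        (fun (st : PySem.Dict Int Int × Int) p => (st.1.insert p.1 st.2, st.2 + p.2.2))
        (r, s)).1.items
      = r.items ++ PySem.List.enumerate
          ((tasks.foldl (fun (st : Int × List Int) task => (st.1 + task.2, st.2 ++ [st.1])) (s, [])).2) k := by
  induction tasks generalizing k s r with
  | nil => simp [PySem.List.enumerate_nil]
  | cons t rest ih =>
      rw [PySem.List.enumerate_cons]
      simp only [List.foldl_cons]
      have hkfresh : r.contains k = false := by
        rcases hc : r.contains k with _ | _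
        · rfl
        · exact absurd (h k ((PySem.Dict.contains_iff_mem_keys r k).mp hc)) (lt_irrefl k)
      have h' : ∀ x ∈ (r.insert k s).keys, x < k + 1 := by
        intro x hx
        rcases (PySem.Dict.mem_keys_insert r k x s).mp hx with rfl | hx'
        · omega
        · have := h x hx'; omega
      rw [ih (k + 1) (s + t.2) (r.insert k s) h']
      rw [PySem.Dict.items_insert_of_not_contains (h := hkfresh)]
      rw [pvStarts_acc rest (s + t.2) ([] ++ [s])]
      rw [show (([] ++ [s]) ++ (rest.foldl (fun (st : Int × List Int) task => (st.1 + task.2, st.2 ++ [st.1])) (s + t.2, [])).2)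
            = s :: (rest.foldl (fun (st : Int × List Int) task => (st.1 + task.2, st.2 ++ [st.1])) (s + t.2, [])).2 from rfl]
      rw [PySem.List.enumerate_cons]
      simp

-- A's inner loop over pyRange is the same loop over enumerate
theorem inner_pyRange (tasks : List (Int × Int)) :
    ((PySem.List.pyRange 0 (tasks.length : Int) 1).foldl
        (fun (st : PySem.Dict Int Int × Int) i =>
          (st.1.insert i st.2, st.2 + (PySem.List.pyGetD tasks i (0, 0)).2))
        (PySem.Dict.empty, 0)).1.items
      = PySem.List.enumerate (pvStarts tasks) 0 := by
  have hmap := PySem.List.enumerate_eq_map_pyRange tasks ((0 : Int), (0 : Int))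
  rw [show (PySem.List.pyRange 0 (tasks.length : Int) 1).foldl
        (fun (st : PySem.Dict Int Int × Int) i =>
          (st.1.insert i st.2, st.2 + (PySem.List.pyGetD tasks i (0, 0)).2))
        (PySem.Dict.empty, 0)
      = (PySem.List.enumerate tasks 0).foldl
          (fun (st : PySem.Dict Int Int × Int) p => (st.1.insert p.1 st.2, st.2 + p.2.2))
          (PySem.Dict.empty, 0) from by
        rw [show PySem.List.enumerate tasks 0 = PySem.List.enumerate tasks from rfl, hmap,
          List.foldl_map]
        rfl]
  rw [inner_items tasks 0 0 PySem.Dict.empty (by simp)]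
  simp [pvStarts, PySem.Dict.empty]

-- flattening step for one inner list of values
theorem flatten_one (ts : List Int) (c : Int) (r : PySem.Dict Int Int)
    (h : ∀ x ∈ r.keys, x < c) :
    (ts.foldl (fun (st2 : Int × PySem.Dict Int Int) q => (st2.1 + 1, st2.2.insert st2.1 q)) (c, r)).1
        = c + ts.length
      ∧ (ts.foldl (fun (st2 : Int × PySem.Dict Int Int) q => (st2.1 + 1, st2.2.insert st2.1 q)) (c, r)).2.items
        = r.items ++ PySem.List.enumerate ts c := by
  induction ts generalizing c r with
  | nil => simp [PySem.List.enumerate_nil]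
  | cons q rest ih =>
      simp only [List.foldl_cons]
      have hkfresh : r.contains c = false := by
        rcases hc : r.contains c with _ | _
        · rfl
        · exact absurd (h c ((PySem.Dict.contains_iff_mem_keys r c).mp hc)) (lt_irrefl c)
      have h' : ∀ x ∈ (r.insert c q).keys, x < c + 1 := by
        intro x hx
        rcases (PySem.Dict.mem_keys_insert r c x q).mp hx with rfl | hx'
        · omega
        · have := h x hx'; omega
      obtain ⟨h1, h2⟩ := ih (c + 1) (r.insert c q) h'
      refine ⟨by rw [h1]; simp only [List.length_cons]; push_cast; omega, ?_⟩
      rw [h2, PySem.Dict.items_insert_of_not_contains (h := hkfresh),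
        PySem.List.enumerate_cons]
      simp

-- A's flattening double loop numbers the concatenation
theorem flatten_all (L : List (List Int)) (c : Int) (r : PySem.Dict Int Int)
    (h : ∀ x ∈ r.keys, x < c) :
    (L.foldl (fun (st : Int × PySem.Dict Int Int) ts =>
        ts.foldl (fun (st2 : Int × PySem.Dict Int Int) q => (st2.1 + 1, st2.2.insert st2.1 q)) st)
      (c, r)).2.items
      = r.items ++ PySem.List.enumerate L.flatten c := by
  induction L generalizing c r with
  | nil => simp [PySem.List.enumerate_nil]
  | cons ts L' ih =>
      simp only [List.foldl_cons]
      obtain ⟨h1, h2⟩ := flatten_one ts c r h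
      have h' : ∀ x ∈ (ts.foldl (fun (st2 : Int × PySem.Dict Int Int) q =>
          (st2.1 + 1, st2.2.insert st2.1 q)) (c, r)).2.keys,
          x < (ts.foldl (fun (st2 : Int × PySem.Dict Int Int) q =>
          (st2.1 + 1, st2.2.insert st2.1 q)) (c, r)).1 := by
        intro x hx
        rw [h1]
        have hx' : x ∈ (r.items ++ PySem.List.enumerate ts c).map Prod.fst := by
          have : (ts.foldl (fun (st2 : Int × PySem.Dict Int Int) q =>
              (st2.1 + 1, st2.2.insert st2.1 q)) (c, r)).2.keys
              = (r.items ++ PySem.List.enumerate ts c).map Prod.fst := by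
            rw [PySem.Dict.keys, h2]
          rwa [this] at hx
        rw [List.map_append] at hx'
        rcases List.mem_append.mp hx' with hx1 | hx2
        · have := h x hx1
          have hn : (0 : Int) ≤ ts.length := by positivity
          omega
        · rw [PySem.List.map_fst_enumerate] at hx2
          have := PySem.List.mem_pyRange_one.mp hx2
          omega
      rw [show (ts.foldl (fun (st2 : Int × PySem.Dict Int Int) q =>
            (st2.1 + 1, st2.2.insert st2.1 q)) (c, r))
          = ((ts.foldl (fun (st2 : Int × PySem.Dict Int Int) q =>
            (st2.1 + 1, st2.2.insert st2.1 q)) (c, r)).1,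
            (ts.foldl (fun (st2 : Int × PySem.Dict Int Int) q =>
            (st2.1 + 1, st2.2.insert st2.1 q)) (c, r)).2) from rfl]
      rw [ih _ _ h', h1, h2, List.flatten_cons,
        PySem.List.enumerate_append]
      simp

-- a fold over the second components of an enumeration is a fold over the list itself
theorem foldl_enumerate_snd {β : Type} (xs : List Int) (g : β → Int → β) (i : β) :
    (PySem.List.enumerate xs 0).foldl (fun a q => g a q.2) i = xs.foldl g i := by
  have := List.foldl_map (f := (Prod.snd : Int × Int → Int)) (g := g)
    (l := PySem.List.enumerate xs 0) (init := i)
  rw [← this, PySem.List.map_snd_enumerate]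

theorem A_eq (jobs : List (Int × List (Int × Int))) (hnd : (jobs.map Prod.fst).Nodup) :
    legal_starting_time jobs
      = PySem.List.enumerate ((jobs.map (fun p => pvStarts p.2)).flatten) 0 := by
  simp only [legal_starting_time]
  have hitems : (PySem.Dict.ofList jobs).items = jobs := ofList_items_of_nodup jobs hnd
  have hkeys : (PySem.Dict.ofList jobs).keys = jobs.map Prod.fst := by
    rw [PySem.Dict.keys, hitems]
  have hd : ((PySem.Dict.ofList jobs).keys.foldl
      (fun (acc : PySem.Dict Int (PySem.Dict Int Int)) j => acc.insert j PySem.Dict.empty)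
      PySem.Dict.empty).items
      = (jobs.map Prod.fst).map (fun j => (j, (PySem.Dict.empty : PySem.Dict Int Int))) := by
    have := PySem.Dict.items_foldl_insert_fresh (l := (PySem.Dict.ofList jobs).keys)
      (k := fun a => a) (v := fun _ => (PySem.Dict.empty : PySem.Dict Int Int))
      (d := (PySem.Dict.empty : PySem.Dict Int (PySem.Dict Int Int))) (by simp)
      (by simpa [hkeys] using hnd)
    simpa [hkeys, PySem.Dict.empty] using this
  rw [hd]
  rw [List.foldl_map, List.foldl_map, List.foldl_map]
  refine Eq.trans (congrArg (fun z : Int × PySem.Dict Int Int => z.2.items)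
    (PySem.List.foldl_congr_mem jobs _
      (fun (st : Int × PySem.Dict Int Int) (p : Int × List (Int × Int)) =>
        (pvStarts p.2).foldl (fun (st2 : Int × PySem.Dict Int Int) q =>
          (st2.1 + 1, st2.2.insert st2.1 q)) st) _ ?_)) ?_
  swap
  · rw [← List.foldl_map (f := fun p : Int × List (Int × Int) => pvStarts p.2)
      (g := fun (st : Int × PySem.Dict Int Int) (ts : List Int) =>
        ts.foldl (fun (st2 : Int × PySem.Dict Int Int) q =>
          (st2.1 + 1, st2.2.insert st2.1 q)) st)]
    dsimp only
    rw [flatten_all (jobs.map (fun p => pvStarts p.2)) 0 PySem.Dict.empty (by simp)]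
    simp [PySem.Dict.empty]
  · intro st p hp
    dsimp only
    have hgetD : (PySem.Dict.ofList jobs).getD p.1 [] = p.2 := by
      apply PySem.Dict.getD_of_mem_items
      · rw [hitems]; exact hp
      · rw [hkeys]; exact hnd
    simp only [hgetD]
    rw [show ((PySem.List.pyRange 0 (p.2.length : Int)).foldl
        (fun (st : PySem.Dict Int Int × Int) i =>
          (st.1.insert i st.2, st.2 + (PySem.List.pyGetD p.2 i (0, 0)).2))
        (PySem.Dict.empty, 0)).1.items = PySem.List.enumerate (pvStarts p.2) 0
      from inner_pyRange p.2]
    exact foldl_enumerate_snd (pvStarts p.2)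
      (fun st2 q => (st2.1 + 1, st2.2.insert st2.1 q)) st

-- ===== VERDICT (by name: the statement is the Claim_ definition above) =====
theorem legal_starting_time_spec : Claim_equal_legal_starting_time := by
  intro jobs _ hnd
  unfold Spec_legal_starting_time
  rw [A_eq jobs hnd, alt_eq jobs]
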